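-- pv_equiv track=rewrite | github.com/kirka00/ege | course_kabanov/16/1/13.py | f
-- ===== SOURCE A (Python) =====
-- def f(n):
--     if n <= 18:
--         return n + 3
--     else:
--         if n % 3 == 0:
--             return (n // 3) * f(n // 3) + n - 12
--         else:
--             return f(n - 1) + n ** 2 + 5
-- ===== SOURCE B (Python) =====
-- def f(n):
--     # iterative: record linear steps while descending, then fold back-to-front
--     steps = []
--     while n > 18:
--         if n % 3 == 0:
--             steps.append((n // 3, n - 12))
--             n = n // 3
--         else:
--             steps.append((1, n ** 2 + 5))
--             n = n - 1
--     result = n + 3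
--     for m, a in reversed(steps):
--         result = m * result + a
--     return result
-- ===== Notes on version B (the rewrite author's own statement) =====
-- stated objective: alternative
-- what changed: Replaces the recursion by an explicit descent loop that records (multiplier, addend) pairs and then folds them back-to-front over the base value.
import Mathlib
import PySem

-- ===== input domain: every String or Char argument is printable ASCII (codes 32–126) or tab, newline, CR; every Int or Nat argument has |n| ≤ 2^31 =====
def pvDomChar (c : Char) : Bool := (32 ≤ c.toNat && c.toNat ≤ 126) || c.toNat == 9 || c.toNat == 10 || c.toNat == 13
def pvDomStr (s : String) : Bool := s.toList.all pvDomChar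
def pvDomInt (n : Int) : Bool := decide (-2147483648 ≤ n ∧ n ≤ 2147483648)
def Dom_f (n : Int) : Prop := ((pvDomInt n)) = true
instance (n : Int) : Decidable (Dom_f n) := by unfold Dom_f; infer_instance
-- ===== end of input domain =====

-- B replaces the recursion by an explicit descent loop recording (multiplier, addend)
-- pairs, folded back-to-front over the base value (objective: alternative decomposition).
-- Both ports use a fuel counter (n.toNat + 1, always sufficient: each step strictly
-- decreases n.toNat while n > 18) purely as a structural-recursion totality guard.

-- ===== PORT A =====
def fGo : Nat → Int → Int
  | 0, n => n + 3          -- fuel exhausted: unreachable for fuel = n.toNat + 1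
  | fuel + 1, n =>
    if n ≤ 18 then n + 3
    else if PySem.Int.mod n 3 = 0 then
      (PySem.Int.floordiv n 3) * fGo fuel (PySem.Int.floordiv n 3) + n - 12
    else
      fGo fuel (n - 1) + n ^ 2 + 5

def f (n : Int) : Int := fGo (n.toNat + 1) n

-- ===== PORT B =====
-- the while loop: collect the (multiplier, addend) steps and return the final n
def fDescGo : Nat → Int → List (Int × Int) × Int
  | 0, n => ([], n)        -- fuel exhausted: unreachable for fuel = n.toNat + 1
  | fuel + 1, n =>
    if n ≤ 18 then ([], n)
    else if PySem.Int.mod n 3 = 0 then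
      let r := fDescGo fuel (PySem.Int.floordiv n 3)
      ((PySem.Int.floordiv n 3, n - 12) :: r.1, r.2)
    else
      let r := fDescGo fuel (n - 1)
      ((1, n ^ 2 + 5) :: r.1, r.2)

def f_alt (n : Int) : Int :=
  let d := fDescGo (n.toNat + 1) n
  (List.reverse d.1).foldl (fun result p => p.1 * result + p.2) (d.2 + 3)

-- ===== PRECONDITION & SPEC =====
def Spec_f (n : Int) (out : Int) : Prop := out = f_alt n
instance (n : Int) (out : Int) : Decidable (Spec_f n out) := by unfold Spec_f; infer_instance

-- ===== CLAIM (what is proved, stated in full; the proofs are below) =====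
def Claim_equal_f : Prop := ∀ (n : Int), Dom_f n → Spec_f n (f n)

-- ===== LEMMAS AND PROOFS =====

theorem foldl_step_append (l : List (Int × Int)) (p : Int × Int) (b : Int) :
    (l ++ [p]).foldl (fun result q => q.1 * result + q.2) b
      = p.1 * (l.foldl (fun result q => q.1 * result + q.2) b) + p.2 := by
  simp [List.foldl_append]

theorem fold_desc_eq_fGo (fuel : Nat) : ∀ (n : Int),
    (List.reverse (fDescGo fuel n).1).foldl (fun result p => p.1 * result + p.2)
      ((fDescGo fuel n).2 + 3) = fGo fuel n := by
  induction fuel with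
  | zero => intro n; simp [fDescGo, fGo]
  | succ fuel ih =>
      intro n
      by_cases h : n ≤ 18
      · simp [fDescGo, fGo, h]
      · by_cases hm : PySem.Int.mod n 3 = 0
        · rw [fDescGo, fGo]; simp only [if_neg h, if_pos hm]
          rw [List.reverse_cons, foldl_step_append, ih]
          ring
        · rw [fDescGo, fGo]; simp only [if_neg h, if_neg hm]
          rw [List.reverse_cons, foldl_step_append, ih]
          ring

-- ===== VERDICT (by name: the statement is the Claim_ definition above) =====
theorem f_spec : Claim_equal_f := by
  intro n _
  unfold Spec_f f_alt f
  exact (fold_desc_eq_fGo (n.toNat + 1) n).symm
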